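-- pv_equiv track=rewrite | github.com/zsqybb/zsqybb | generate_position_data.py | generate_skill_sequence
-- ===== SOURCE A (Python) =====
-- def generate_skill_sequence(priority_str):
--     """
--     从 "R>Q>W>E" 格式生成1-18级加点序列
--     返回: ["Q", "W", "E", "Q", "Q", "R", "Q", "W", "Q", "W", "R", "W", "W", "E", "E", "R", "E", "E"]
--     """
--     if not priority_str or '>' not in priority_str:
--         # 默认加点：R>Q>W>E
--         priority_str = "R>Q>W>E"
--
--     parts = [p.strip().upper() for p in priority_str.split('>')]
--     if len(parts) < 4:
--         parts = ['R', 'Q', 'W', 'E']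
--
--     # 确保R在第一位
--     if 'R' not in parts:
--         parts.insert(0, 'R')
--     elif parts[0] != 'R':
--         parts.remove('R')
--         parts.insert(0, 'R')
--
--     # 确保有Q, W, E
--     for skill in ['Q', 'W', 'E']:
--         if skill not in parts:
--             parts.append(skill)
--
--     # 技能优先级（排除R）：决定加满顺序
--     skill_order = [p for p in parts if p != 'R']  # e.g., ['Q', 'W', 'E']
--
--     # R的等级：6, 11, 16
--     r_levels = {6, 11, 16}
--
--     # 每个技能最多5点
--     skill_points = {s: 0 for s in ['Q', 'W', 'E', 'R']}
--     max_points = {'Q': 5, 'W': 5, 'E': 5, 'R': 3}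
--
--     sequence = []
--     current_priority_idx = 0  # 当前正在加满的技能索引
--
--     for level in range(1, 19):
--         if level in r_levels:
--             sequence.append('R')
--             skill_points['R'] += 1
--         else:
--             # 按优先级加点
--             placed = False
--             for skill in skill_order:
--                 if skill_points[skill] < max_points[skill]:
--                     sequence.append(skill)
--                     skill_points[skill] += 1
--                     placed = True
--                     break
--             if not placed:
--                 # 不应该发生，但以防万一
--                 sequence.append(skill_order[0])
--
--     return sequence
-- ===== SOURCE B (Python) =====
-- def generate_skill_sequence(priority_str):
--     # Staged pipeline: normalize tokens, build the flat 15-entry non-R fill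
--     # list by draining per-skill caps, then weave 'R' in at levels 6/11/16.
--     if not priority_str or '>' not in priority_str:
--         priority_str = "R>Q>W>E"
--     tokens = [p.strip().upper() for p in priority_str.split('>')]
--     if len(tokens) < 4:
--         tokens = ['R', 'Q', 'W', 'E']
--     order = [t for t in tokens if t != 'R']
--     order += [s for s in ('Q', 'W', 'E') if s not in order]
--
--     caps = {'Q': 5, 'W': 5, 'E': 5}
--     fill = []
--     for skill in order:
--         if len(fill) >= 15:
--             break
--         take = min(caps[skill], 15 - len(fill))
--         caps[skill] -= take
--         fill += [skill] * take
--
--     it = iter(fill)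
--     return ['R' if level in (6, 11, 16) else next(it) for level in range(1, 19)]
-- ===== Notes on version B (the rewrite author's own statement) =====
-- stated objective: alternative
-- what changed: B replaces A's 18-level loop (which rescans the priority list for the first non-maxed skill at every level, tracking an up-counting points dict that also covers R, and repositions R in the parsed list even though R is filtered out anyway) with a staged pipeline: filter R out of the tokens and append the missing Q/W/E, drain a count-down caps dict once to emit the flat 15-entry non-R fill list, then weave 'R' in at levels 6/11/16 while consuming the fill list with an iterator.
import Mathlib
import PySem

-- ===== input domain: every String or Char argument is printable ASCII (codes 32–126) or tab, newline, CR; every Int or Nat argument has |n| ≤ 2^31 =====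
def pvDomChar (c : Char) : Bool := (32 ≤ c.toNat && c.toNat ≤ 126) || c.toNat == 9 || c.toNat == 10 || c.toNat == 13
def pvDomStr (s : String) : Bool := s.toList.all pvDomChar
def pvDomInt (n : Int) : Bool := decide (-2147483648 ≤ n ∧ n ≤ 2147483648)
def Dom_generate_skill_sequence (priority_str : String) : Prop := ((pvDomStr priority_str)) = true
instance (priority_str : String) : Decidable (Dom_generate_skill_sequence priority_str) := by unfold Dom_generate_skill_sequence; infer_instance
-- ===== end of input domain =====

-- B rebuilds the 18-slot sequence as a staged pipeline (token filter + append-missing, a flat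
-- 15-entry fill list drained from per-skill caps, then weave R in at 6/11/16) instead of A's
-- per-level rescans of the priority list; objective: alternative decomposition.

-- ===== PORT A =====

-- normalization prologue of A
def pvParseA (priority_str : String) : List String :=
  let ps := if priority_str = "" ∨ PySem.Str.isIn ">" priority_str = false then "R>Q>W>E" else priority_str
  let parts := ((PySem.Str.split? ps ">").getD []).map (fun p => PySem.Str.upper (PySem.Str.strip p))
  let parts := if parts.length < 4 then ["R", "Q", "W", "E"] else parts
  let parts :=
    if parts.contains "R" = false then PySem.List.insert parts 0 "R"
    -- parts[0]: parts has length ≥ 4 here, so the default of pyGetD is never used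
    else if PySem.List.pyGetD parts 0 "" ≠ "R" then
      -- parts.remove('R'): the branch guarantees "R" ∈ parts, so remove? is some
      PySem.List.insert ((PySem.List.remove? parts "R").getD parts) 0 "R"
    else parts
  let parts := (["Q", "W", "E"]).foldl (fun ps s => if ps.contains s then ps else ps ++ [s]) parts
  parts.filter (fun p => p != "R")

def pvMaxPoints : PySem.Dict String Int :=
  PySem.Dict.ofList [("Q", 5), ("W", 5), ("E", 5), ("R", 3)]

def pvRLevels : PySem.Set Int := PySem.Set.ofList [6, 11, 16]

-- inner 'for skill in skill_order: … break' loop of A; returns (skill_points, sequence, placed).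
-- skill_points[skill] is ported as getD _ 0: Python raises KeyError on a missing key, and Pre_
-- excludes exactly the inputs on which that read is reached.
def pvAScan (pts : PySem.Dict String Int) (seq : List String) :
    List String → PySem.Dict String Int × List String × Bool
  | [] => (pts, seq, false)
  | s :: rest =>
      if pts.getD s 0 < pvMaxPoints.getD s 0 then
        (pts.insert s (pts.getD s 0 + 1), seq ++ [s], true)
      else pvAScan pts seq rest

-- 'for level in range(1, 19)' loop of A
def pvALevels (order : List String) :
    List Int → PySem.Dict String Int → List String → List String
  | [], _, seq => seq
  | l :: ls, pts, seq =>
      if PySem.Set.contains pvRLevels l then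
        pvALevels order ls (pts.insert "R" (pts.getD "R" 0 + 1)) (seq ++ ["R"])
      else
        match pvAScan pts seq order with
        | (pts', seq', placed) =>
          if placed then pvALevels order ls pts' seq'
          -- skill_order[0]: unreachable fallback of A ('不应该发生'), ported with pyGetD
          else pvALevels order ls pts' (seq' ++ [PySem.List.pyGetD order 0 ""])

def generate_skill_sequence (priority_str : String) : List String :=
  let skill_order := pvParseA priority_str
  let skill_points := (["Q", "W", "E", "R"]).foldl (fun d s => d.insert s (0 : Int)) PySem.Dict.empty
  pvALevels skill_order (PySem.List.pyRange 1 19 1) skill_points []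

-- ===== PORT B =====

-- B's tokenization: the same three normalization statements as A's prologue
def pvTokens (priority_str : String) : List String :=
  let ps := if priority_str = "" ∨ PySem.Str.isIn ">" priority_str = false then "R>Q>W>E" else priority_str
  let toks := ((PySem.Str.split? ps ">").getD []).map (fun p => PySem.Str.upper (PySem.Str.strip p))
  if toks.length < 4 then ["R", "Q", "W", "E"] else toks

-- order = [t for t in tokens if t != 'R']; order += [s for s in ('Q','W','E') if s not in order]
def pvOrderB (priority_str : String) : List String :=
  let order := (pvTokens priority_str).filter (fun t => t != "R")
  order ++ (["Q", "W", "E"]).filter (fun s => !order.contains s)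

def pvCaps0 : PySem.Dict String Int := PySem.Dict.ofList [("Q", 5), ("W", 5), ("E", 5)]

-- B's fill loop: caps[skill] ported as getD _ 0 (Python raises KeyError on a missing key; Pre_
-- excludes exactly the inputs reaching it); [skill] * take is replicate take.toNat
def pvBFill : List String → PySem.Dict String Int → List String → List String
  | [], _, fill => fill
  | s :: rest, caps, fill =>
      if 15 ≤ (fill.length : Int) then fill
      else
        let take := min (caps.getD s 0) (15 - (fill.length : Int))
        pvBFill rest (caps.insert s (caps.getD s 0 - take)) (fill ++ List.replicate take.toNat s)

-- B's output comprehension over range(1,19); next(it) is head/tail of the fill list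
-- (never exhausted when B returns, so the headD default is never used)
def pvBOut : List Int → List String → List String
  | [], _ => []
  | l :: ls, fl =>
      if l = 6 ∨ l = 11 ∨ l = 16 then "R" :: pvBOut ls fl
      else fl.headD "" :: pvBOut ls fl.tail

def generate_skill_sequence_alt (priority_str : String) : List String :=
  pvBOut (PySem.List.pyRange 1 19 1) (pvBFill (pvOrderB priority_str) pvCaps0 [])

-- ===== PRECONDITION & SPEC =====

-- Pre_ excludes exactly the inputs on which Python A raises KeyError: a normalized priority token
-- other than Q/W/E/R that occurs before all three of Q, W, E have occurred (the leveling loop then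
-- reaches it and reads skill_points[token]); B raises the same KeyError there.
def pvOkScan : List String → Bool → Bool → Bool → Bool
  | [], _, _, _ => true
  | s :: rest, q, w, e =>
      if s = "Q" then pvOkScan rest true w e
      else if s = "W" then pvOkScan rest q true e
      else if s = "E" then pvOkScan rest q w true
      else (q && w && e) && pvOkScan rest q w e

def Pre_generate_skill_sequence (priority_str : String) : Prop :=
  priority_str = "" ∨ PySem.Str.isIn ">" priority_str = false ∨
    (let toks := ((PySem.Str.split? priority_str ">").getD []).map (fun p => PySem.Str.upper (PySem.Str.strip p))
     toks.length < 4 ∨ pvOkScan (toks.filter (fun p => p != "R")) false false false = true)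

instance (priority_str : String) : Decidable (Pre_generate_skill_sequence priority_str) := by
  unfold Pre_generate_skill_sequence; infer_instance

def pvWitness_generate_skill_sequence : String := "q > w>E>R"

def Spec_generate_skill_sequence (priority_str : String) (out : List String) : Prop := out = generate_skill_sequence_alt priority_str
instance (priority_str : String) (out : List String) : Decidable (Spec_generate_skill_sequence priority_str out) := by unfold Spec_generate_skill_sequence; infer_instance

-- ===== CLAIM (what is proved, stated in full; the proofs are below) =====
def Claim_equal_generate_skill_sequence : Prop := ∀ (priority_str : String), Dom_generate_skill_sequence priority_str → Pre_generate_skill_sequence priority_str → Spec_generate_skill_sequence priority_str (generate_skill_sequence priority_str)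

-- ===== LEMMAS AND PROOFS =====

-- abstract state: how many points Q, W, E have; the dicts of both ports are tracked through pvRel/pvRelC
def pvCanon (q w e r : Int) : PySem.Dict String Int :=
  ((((PySem.Dict.empty).insert "Q" q).insert "W" w).insert "E" e).insert "R" r

def pvRel (d : PySem.Dict String Int) (q w e : Int) : Prop :=
  d.getD "Q" 0 = q ∧ d.getD "W" 0 = w ∧ d.getD "E" 0 = e ∧
  ∀ s : String, s ≠ "Q" → s ≠ "W" → s ≠ "E" → s ≠ "R" → d.getD s 0 = 0

-- B's caps dict tracked against the same abstract point counts (caps count DOWN from 5)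
def pvRelC (d : PySem.Dict String Int) (q w e : Int) : Prop :=
  d.getD "Q" 0 = 5 - q ∧ d.getD "W" 0 = 5 - w ∧ d.getD "E" 0 = 5 - e ∧
  ∀ s : String, s ≠ "Q" → s ≠ "W" → s ≠ "E" → d.getD s 0 = 0

-- the skill A's inner scan picks, as a function of the abstract state
def pvPick : List String → Int → Int → Int → Option String
  | [], _, _, _ => none
  | s :: rest, q, w, e =>
      if s = "Q" then (if q < 5 then some "Q" else pvPick rest q w e)
      else if s = "W" then (if w < 5 then some "W" else pvPick rest q w e)
      else if s = "E" then (if e < 5 then some "E" else pvPick rest q w e)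
      else pvPick rest q w e

def pvD (s t : String) : Int := if s = t then 1 else 0

-- abstract form of A's level loop
def pvASim (order : List String) : List Int → Int → Int → Int → List String
  | [], _, _, _ => []
  | l :: ls, q, w, e =>
      if PySem.Set.contains pvRLevels l then "R" :: pvASim order ls q w e
      else match pvPick order q w e with
        | none => PySem.List.pyGetD order 0 "" :: pvASim order ls q w e
        | some s => s :: pvASim order ls (q + pvD s "Q") (w + pvD s "W") (e + pvD s "E")

-- abstract form of B's fill loop
def pvFillAbs : List String → Int → Int → Int → Int → List String
  | [], _, _, _, _ => []
  | s :: rest, q, w, e, n =>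
      if n ≤ 0 then []
      else if s = "Q" then
        List.replicate (min (5 - q) n).toNat "Q" ++ pvFillAbs rest (q + min (5 - q) n) w e (n - min (5 - q) n)
      else if s = "W" then
        List.replicate (min (5 - w) n).toNat "W" ++ pvFillAbs rest q (w + min (5 - w) n) e (n - min (5 - w) n)
      else if s = "E" then
        List.replicate (min (5 - e) n).toNat "E" ++ pvFillAbs rest q w (e + min (5 - e) n) (n - min (5 - e) n)
      else pvFillAbs rest q w e n

-- abstract form of B's assembly loop
def pvWeave : List Int → List String → List String
  | [], _ => []
  | l :: ls, fl =>
      if PySem.Set.contains pvRLevels l then "R" :: pvWeave ls fl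
      else fl.headD "" :: pvWeave ls fl.tail

-- number of non-R levels among a list of levels
def pvNonR : List Int → Int
  | [] => 0
  | l :: ls => (if PySem.Set.contains pvRLevels l then 0 else 1) + pvNonR ls

-- total number of points the fill loop can still hand out
def pvCap : List String → Int → Int → Int → Int
  | [], _, _, _ => 0
  | s :: rest, q, w, e =>
      if s = "Q" then (5 - q) + pvCap rest 5 w e
      else if s = "W" then (5 - w) + pvCap rest q 5 e
      else if s = "E" then (5 - e) + pvCap rest q w 5
      else pvCap rest q w e

lemma pvRel_canon (q w e r : Int) : pvRel (pvCanon q w e r) q w e := by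
  refine ⟨rfl, rfl, rfl, fun s h1 h2 h3 h4 => ?_⟩
  have b1 : ("Q" == s) = false := by simp [Ne.symm h1]
  have b2 : ("W" == s) = false := by simp [Ne.symm h2]
  have b3 : ("E" == s) = false := by simp [Ne.symm h3]
  have b4 : ("R" == s) = false := by simp [Ne.symm h4]
  simp [pvCanon, PySem.Dict.getD, PySem.Dict.get?, PySem.Dict.empty, PySem.Dict.insert,
    List.find?, b1, b2, b3, b4]

lemma pvRelC_caps0 : pvRelC pvCaps0 0 0 0 := by
  refine ⟨rfl, rfl, rfl, fun s h1 h2 h3 => ?_⟩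
  have b1 : ("Q" == s) = false := by simp [Ne.symm h1]
  have b2 : ("W" == s) = false := by simp [Ne.symm h2]
  have b3 : ("E" == s) = false := by simp [Ne.symm h3]
  simp [pvCaps0, PySem.Dict.getD, PySem.Dict.get?, PySem.Dict.ofList, PySem.Dict.empty,
    PySem.Dict.update, PySem.Dict.insert, List.find?, b1, b2, b3]

lemma pvMaxPoints_getD (s : String) :
    pvMaxPoints.getD s 0 =
      if s = "Q" then 5 else if s = "W" then 5 else if s = "E" then 5 else if s = "R" then 3 else 0 := by
  by_cases h1 : s = "Q"
  · subst h1; rfl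
  by_cases h2 : s = "W"
  · subst h2; rfl
  by_cases h3 : s = "E"
  · subst h3; rfl
  by_cases h4 : s = "R"
  · subst h4; rfl
  have b1 : ("Q" == s) = false := by simp [Ne.symm h1]
  have b2 : ("W" == s) = false := by simp [Ne.symm h2]
  have b3 : ("E" == s) = false := by simp [Ne.symm h3]
  have b4 : ("R" == s) = false := by simp [Ne.symm h4]
  rw [show pvMaxPoints = pvCanon 5 5 5 3 from rfl]
  simp [pvCanon, PySem.Dict.getD, PySem.Dict.get?, PySem.Dict.empty, PySem.Dict.insert,
    List.find?, b1, b2, b3, b4, h1, h2, h3, h4]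

lemma pvRel_insert_known (d : PySem.Dict String Int) (q w e v : Int) (t : String)
    (ht : t = "Q" ∨ t = "W" ∨ t = "E") (hd : pvRel d q w e) :
    pvRel (d.insert t v) (if t = "Q" then v else q) (if t = "W" then v else w) (if t = "E" then v else e) := by
  obtain ⟨hq, hw, he, ho⟩ := hd
  rcases ht with h | h | h <;> subst h <;> simp only [reduceIte] <;>
    exact ⟨by simp [PySem.Dict.getD_insert, hq, hw, he],
      by simp [PySem.Dict.getD_insert, hq, hw, he],
      by simp [PySem.Dict.getD_insert, hq, hw, he],
      fun s h1 h2 h3 h4 => by simp [PySem.Dict.getD_insert, h1, h2, h3, ho s h1 h2 h3 h4]⟩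

lemma pvRel_insert_R (d : PySem.Dict String Int) (q w e v : Int) (hd : pvRel d q w e) :
    pvRel (d.insert "R" v) q w e := by
  obtain ⟨hq, hw, he, ho⟩ := hd
  exact ⟨by simp [PySem.Dict.getD_insert, hq], by simp [PySem.Dict.getD_insert, hw],
    by simp [PySem.Dict.getD_insert, he],
    fun s h1 h2 h3 h4 => by simp [PySem.Dict.getD_insert, h4, ho s h1 h2 h3 h4]⟩

lemma pvPick_spec {order : List String} {q w e : Int} {s : String}
    (h : pvPick order q w e = some s) :
    s ∈ order ∧ ((s = "Q" ∧ q < 5) ∨ (s = "W" ∧ w < 5) ∨ (s = "E" ∧ e < 5)) := by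
  induction order with
  | nil => simp [pvPick] at h
  | cons a rest ih =>
    by_cases ha : a = "Q"
    · subst ha
      by_cases hq : q < 5
      · simp [pvPick, hq] at h; subst h; exact ⟨by simp, Or.inl ⟨rfl, hq⟩⟩
      · simp [pvPick, hq] at h; obtain ⟨h1, h2⟩ := ih h; exact ⟨by simp [h1], h2⟩
    · by_cases hb : a = "W"
      · subst hb
        by_cases hw : w < 5
        · simp [pvPick, hw] at h; subst h; exact ⟨by simp, Or.inr (Or.inl ⟨rfl, hw⟩)⟩
        · simp [pvPick, hw] at h; obtain ⟨h1, h2⟩ := ih h; exact ⟨by simp [h1], h2⟩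
      · by_cases hc : a = "E"
        · subst hc
          by_cases he : e < 5
          · simp [pvPick, he] at h; subst h; exact ⟨by simp, Or.inr (Or.inr ⟨rfl, he⟩)⟩
          · simp [pvPick, he] at h; obtain ⟨h1, h2⟩ := ih h; exact ⟨by simp [h1], h2⟩
        · simp [pvPick, ha, hb, hc] at h; obtain ⟨h1, h2⟩ := ih h; exact ⟨by simp [h1], h2⟩

lemma pvAScan_eq {order : List String} (hR : "R" ∉ order) {d : PySem.Dict String Int} {q w e : Int}
    (hd : pvRel d q w e) (seq : List String) :
    pvAScan d seq order =
      match pvPick order q w e with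
      | none => (d, seq, false)
      | some s => (d.insert s ((if s = "Q" then q else if s = "W" then w else e) + 1), seq ++ [s], true) := by
  induction order with
  | nil => rfl
  | cons a rest ih =>
    simp only [List.mem_cons, not_or] at hR
    obtain ⟨haR, hR'⟩ := hR
    obtain ⟨hq, hw, he, ho⟩ := hd
    by_cases h1 : a = "Q"
    · subst h1
      rw [pvAScan, show pvMaxPoints.getD "Q" 0 = 5 from rfl, hq]
      by_cases h5 : q < 5
      · simp [pvPick, h5]
      · rw [if_neg h5, ih hR']
        simp [pvPick, h5]
    · by_cases h2 : a = "W"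
      · subst h2
        rw [pvAScan, show pvMaxPoints.getD "W" 0 = 5 from rfl, hw]
        by_cases h5 : w < 5
        · simp [pvPick, h5]
        · rw [if_neg h5, ih hR']
          simp [pvPick, h5]
      · by_cases h3 : a = "E"
        · subst h3
          rw [pvAScan, show pvMaxPoints.getD "E" 0 = 5 from rfl, he]
          by_cases h5 : e < 5
          · simp [pvPick, h5]
          · rw [if_neg h5, ih hR']
            simp [pvPick, h5]
        · rw [pvAScan, ho a h1 h2 h3 (Ne.symm haR), pvMaxPoints_getD,
            if_neg h1, if_neg h2, if_neg h3, if_neg (Ne.symm haR)]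
          rw [if_neg (by omega : ¬ (0 : Int) < 0), ih hR']
          simp [pvPick, h1, h2, h3]

lemma pvALevels_eq {order : List String} (hR : "R" ∉ order) :
    ∀ (ls : List Int) {d : PySem.Dict String Int} {q w e : Int}, pvRel d q w e → ∀ (seq : List String),
      pvALevels order ls d seq = seq ++ pvASim order ls q w e := by
  intro ls
  induction ls with
  | nil => intro d q w e hd seq; simp [pvALevels, pvASim]
  | cons l ls ih =>
    intro d q w e hd seq
    rw [pvALevels, pvASim]
    by_cases hl : PySem.Set.contains pvRLevels l
    · rw [if_pos hl, if_pos hl, ih (pvRel_insert_R d q w e _ hd)]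
      simp
    · rw [if_neg hl, if_neg hl, pvAScan_eq hR hd seq]
      cases hp : pvPick order q w e with
      | none =>
        simp only [hp]
        simp [ih hd]
      | some s =>
        simp only [hp]
        obtain ⟨hmem, hcase⟩ := pvPick_spec hp
        have hrel := pvRel_insert_known d q w e
          ((if s = "Q" then q else if s = "W" then w else e) + 1) s
          (by rcases hcase with ⟨h, _⟩ | ⟨h, _⟩ | ⟨h, _⟩ <;> simp [h]) hd
        rcases hcase with ⟨h, _⟩ | ⟨h, _⟩ | ⟨h, _⟩ <;> subst h <;>
          simp only [reduceIte, pvD] at hrel ⊢ <;>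
          rw [ih hrel] <;> simp

-- B's fill loop against the abstract fill: the caps dict tracks 5 - points, the remaining
-- budget is 15 - len(fill)
lemma pvBFill_spec {order : List String} :
    ∀ {d : PySem.Dict String Int} {q w e : Int}, pvRelC d q w e →
      0 ≤ q → q ≤ 5 → 0 ≤ w → w ≤ 5 → 0 ≤ e → e ≤ 5 → ∀ (fill : List String),
      pvBFill order d fill = fill ++ pvFillAbs order q w e (15 - (fill.length : Int)) := by
  induction order with
  | nil => intro d q w e _ _ _ _ _ _ _ fill; simp [pvBFill, pvFillAbs]
  | cons a rest ih =>
    intro d q w e hd hq0 hq5 hw0 hw5 he0 he5 fill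
    obtain ⟨hq, hw, he, ho⟩ := hd
    rw [pvBFill, pvFillAbs]
    by_cases hstop : (15 : Int) - (fill.length : Int) ≤ 0
    · rw [if_pos (by omega : 15 ≤ (fill.length : Int)), if_pos hstop, List.append_nil]
    rw [if_neg (by omega : ¬ 15 ≤ (fill.length : Int)), if_neg hstop]
    by_cases h1 : a = "Q"
    · subst h1
      rw [hq, if_pos rfl]
      set t : Int := min (5 - q) (15 - (fill.length : Int)) with ht
      have ht0 : 0 ≤ t := by omega
      have hlen : ((fill ++ List.replicate t.toNat "Q").length : Int) = (fill.length : Int) + t := by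
        simp only [List.length_append, List.length_replicate]
        push_cast
        omega
      have hrec := ih (d := d.insert "Q" (5 - q - t)) (q := q + t) (w := w) (e := e)
        ⟨by simp [PySem.Dict.getD_insert]; ring,
         by simp [PySem.Dict.getD_insert, hw],
         by simp [PySem.Dict.getD_insert, he],
         fun s s1 s2 s3 => by simp [PySem.Dict.getD_insert, s1, ho s s1 s2 s3]⟩
        (by omega) (by omega) hw0 hw5 he0 he5 (fill ++ List.replicate t.toNat "Q")
      rw [hrec, hlen, show (15 : Int) - ((fill.length : Int) + t) = 15 - (fill.length : Int) - t from by ring,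
        List.append_assoc]
    · by_cases h2 : a = "W"
      · subst h2
        rw [hw, if_neg h1, if_pos rfl]
        set t : Int := min (5 - w) (15 - (fill.length : Int)) with ht
        have ht0 : 0 ≤ t := by omega
        have hlen : ((fill ++ List.replicate t.toNat "W").length : Int) = (fill.length : Int) + t := by
          simp only [List.length_append, List.length_replicate]
          push_cast
          omega
        have hrec := ih (d := d.insert "W" (5 - w - t)) (q := q) (w := w + t) (e := e)
          ⟨by simp [PySem.Dict.getD_insert, hq],
           by simp [PySem.Dict.getD_insert]; ring,
           by simp [PySem.Dict.getD_insert, he],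
           fun s s1 s2 s3 => by simp [PySem.Dict.getD_insert, s2, ho s s1 s2 s3]⟩
          hq0 hq5 (by omega) (by omega) he0 he5 (fill ++ List.replicate t.toNat "W")
        rw [hrec, hlen, show (15 : Int) - ((fill.length : Int) + t) = 15 - (fill.length : Int) - t from by ring,
          List.append_assoc]
      · by_cases h3 : a = "E"
        · subst h3
          rw [he, if_neg h1, if_neg h2, if_pos rfl]
          set t : Int := min (5 - e) (15 - (fill.length : Int)) with ht
          have ht0 : 0 ≤ t := by omega
          have hlen : ((fill ++ List.replicate t.toNat "E").length : Int) = (fill.length : Int) + t := by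
            simp only [List.length_append, List.length_replicate]
            push_cast
            omega
          have hrec := ih (d := d.insert "E" (5 - e - t)) (q := q) (w := w) (e := e + t)
            ⟨by simp [PySem.Dict.getD_insert, hq],
             by simp [PySem.Dict.getD_insert, hw],
             by simp [PySem.Dict.getD_insert]; ring,
             fun s s1 s2 s3 => by simp [PySem.Dict.getD_insert, s3, ho s s1 s2 s3]⟩
            hq0 hq5 hw0 hw5 (by omega) (by omega) (fill ++ List.replicate t.toNat "E")
          rw [hrec, hlen, show (15 : Int) - ((fill.length : Int) + t) = 15 - (fill.length : Int) - t from by ring,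
            List.append_assoc]
        · rw [ho a h1 h2 h3, if_neg h1, if_neg h2, if_neg h3,
            show min (0 : Int) (15 - (fill.length : Int)) = 0 from by omega]
          show pvBFill rest (d.insert a (0 - 0)) (fill ++ List.replicate ((0 : Int)).toNat a)
              = fill ++ pvFillAbs rest q w e (15 - (fill.length : Int))
          rw [show (fill ++ List.replicate ((0 : Int)).toNat a) = fill from by simp]
          have hrec := ih (d := d.insert a (0 - 0)) (q := q) (w := w) (e := e)
            ⟨by simp [PySem.Dict.getD_insert, Ne.symm h1, hq],
             by simp [PySem.Dict.getD_insert, Ne.symm h2, hw],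
             by simp [PySem.Dict.getD_insert, Ne.symm h3, he],
             fun s s1 s2 s3 => by
               by_cases hsa : s = a
               · simp [PySem.Dict.getD_insert, hsa]
               · simp [PySem.Dict.getD_insert, hsa, ho s s1 s2 s3]⟩
            hq0 hq5 hw0 hw5 he0 he5 fill
          exact hrec

lemma pvGuard_eq (l : Int) :
    PySem.Set.contains pvRLevels l = decide (l = 6 ∨ l = 11 ∨ l = 16) := by
  rw [show pvRLevels = ([6, 11, 16] : List Int) from rfl]
  simp [PySem.Set.contains]

-- B's assembly loop is the abstract weave
lemma pvBOut_eq_weave : ∀ (ls : List Int) (fl : List String), pvBOut ls fl = pvWeave ls fl := by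
  intro ls
  induction ls with
  | nil => intro fl; rfl
  | cons l ls ih =>
    intro fl
    rw [pvBOut, pvWeave, pvGuard_eq]
    by_cases hl : l = 6 ∨ l = 11 ∨ l = 16
    · rw [if_pos hl, if_pos (by simpa using hl), ih]
    · rw [if_neg hl, if_neg (by simpa using hl), ih]

lemma pvFillAbs_nonpos (order : List String) (q w e n : Int) (h : n ≤ 0) :
    pvFillAbs order q w e n = [] := by
  cases order with
  | nil => rfl
  | cons s rest => simp [pvFillAbs, h]

lemma pvFill_cons (order : List String) :
    ∀ (q w e n : Int), 0 ≤ q → q ≤ 5 → 0 ≤ w → w ≤ 5 → 0 ≤ e → e ≤ 5 → 0 < n →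
      n ≤ pvCap order q w e →
      ∃ s, pvPick order q w e = some s ∧
        pvFillAbs order q w e n =
          s :: pvFillAbs order (q + pvD s "Q") (w + pvD s "W") (e + pvD s "E") (n - 1) := by
  induction order with
  | nil =>
    intro q w e n _ _ _ _ _ _ hn hcap
    simp only [pvCap] at hcap
    omega
  | cons a rest ih =>
    intro q w e n hq0 hq5 hw0 hw5 he0 he5 hn hcap
    by_cases h1 : a = "Q"
    · subst h1
      by_cases h5 : q < 5
      · refine ⟨"Q", by simp [pvPick, h5], ?_⟩
        simp only [pvD, String.reduceEq, reduceIte, add_zero]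
        rw [pvFillAbs, if_neg (by omega : ¬ n ≤ 0), if_pos rfl]
        by_cases hn1 : n - 1 ≤ 0
        · rw [show min ((5 : Int) - q) n = 1 from by omega,
            pvFillAbs_nonpos rest (q + 1) w e (n - 1) hn1,
            pvFillAbs_nonpos ("Q" :: rest) (q + 1) w e (n - 1) hn1]
          simp
        · conv_rhs => rw [pvFillAbs]
          rw [if_neg hn1, if_pos rfl,
            show min ((5 : Int) - (q + 1)) (n - 1) = min (5 - q) n - 1 from by omega,
            show q + 1 + (min ((5 : Int) - q) n - 1) = q + min (5 - q) n from by ring,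
            show n - 1 - (min ((5 : Int) - q) n - 1) = n - min (5 - q) n from by ring,
            show (min ((5 : Int) - q) n).toNat = (min ((5 : Int) - q) n - 1).toNat + 1 from by omega,
            List.replicate_succ]
          simp
      · have hq : q = 5 := by omega
        subst hq
        have hcap' : n ≤ pvCap rest 5 w e := by
          simp only [pvCap, reduceIte] at hcap; omega
        obtain ⟨s, hps, hfs⟩ := ih 5 w e n (by norm_num) le_rfl hw0 hw5 he0 he5 hn hcap'
        have hsne : s ≠ "Q" := by
          rcases (pvPick_spec hps).2 with ⟨h, hlt⟩ | ⟨h, _⟩ | ⟨h, _⟩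
          · omega
          · simp [h]
          · simp [h]
        refine ⟨s, by simp [pvPick, h5, hps], ?_⟩
        have hzero : pvD s "Q" = 0 := by simp [pvD, hsne]
        rw [pvFillAbs, if_neg (by omega : ¬ n ≤ 0), if_pos rfl,
          show min ((5 : Int) - 5) n = 0 from by omega]
        simp only [Int.toNat_zero, List.replicate_zero, List.nil_append, add_zero, sub_zero]
        rw [hfs, hzero, add_zero]
        congr 1
        by_cases hn1 : n - 1 ≤ 0
        · rw [pvFillAbs_nonpos rest _ _ _ _ hn1, pvFillAbs_nonpos ("Q" :: rest) _ _ _ _ hn1]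
        · conv_rhs => rw [pvFillAbs]
          rw [if_neg hn1, if_pos rfl, show min ((5 : Int) - 5) (n - 1) = 0 from by omega]
          simp
    · by_cases h2 : a = "W"
      · subst h2
        by_cases h5 : w < 5
        · refine ⟨"W", by simp [pvPick, h5], ?_⟩
          simp only [pvD, String.reduceEq, reduceIte, add_zero]
          rw [pvFillAbs, if_neg (by omega : ¬ n ≤ 0), if_neg h1, if_pos rfl]
          by_cases hn1 : n - 1 ≤ 0
          · rw [show min ((5 : Int) - w) n = 1 from by omega,
              pvFillAbs_nonpos rest q (w + 1) e (n - 1) hn1,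
              pvFillAbs_nonpos ("W" :: rest) q (w + 1) e (n - 1) hn1]
            simp
          · conv_rhs => rw [pvFillAbs]
            rw [if_neg hn1, if_neg h1, if_pos rfl,
              show min ((5 : Int) - (w + 1)) (n - 1) = min (5 - w) n - 1 from by omega,
              show w + 1 + (min ((5 : Int) - w) n - 1) = w + min (5 - w) n from by ring,
              show n - 1 - (min ((5 : Int) - w) n - 1) = n - min (5 - w) n from by ring,
              show (min ((5 : Int) - w) n).toNat = (min ((5 : Int) - w) n - 1).toNat + 1 from by omega,
              List.replicate_succ]
            simp
        · have hw : w = 5 := by omega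
          subst hw
          have hcap' : n ≤ pvCap rest q 5 e := by
            simp only [pvCap, reduceIte, if_neg h1] at hcap; omega
          obtain ⟨s, hps, hfs⟩ := ih q 5 e n hq0 hq5 (by norm_num) le_rfl he0 he5 hn hcap'
          have hsne : s ≠ "W" := by
            rcases (pvPick_spec hps).2 with ⟨h, _⟩ | ⟨h, hlt⟩ | ⟨h, _⟩
            · simp [h]
            · omega
            · simp [h]
          refine ⟨s, by simp [pvPick, h5, hps], ?_⟩
          have hzero : pvD s "W" = 0 := by simp [pvD, hsne]
          rw [pvFillAbs, if_neg (by omega : ¬ n ≤ 0), if_neg h1, if_pos rfl,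
            show min ((5 : Int) - 5) n = 0 from by omega]
          simp only [Int.toNat_zero, List.replicate_zero, List.nil_append, add_zero, sub_zero]
          rw [hfs, hzero, add_zero]
          congr 1
          by_cases hn1 : n - 1 ≤ 0
          · rw [pvFillAbs_nonpos rest _ _ _ _ hn1, pvFillAbs_nonpos ("W" :: rest) _ _ _ _ hn1]
          · conv_rhs => rw [pvFillAbs]
            rw [if_neg hn1, if_neg h1, if_pos rfl, show min ((5 : Int) - 5) (n - 1) = 0 from by omega]
            simp
      · by_cases h3 : a = "E"
        · subst h3
          by_cases h5 : e < 5
          · refine ⟨"E", by simp [pvPick, h5], ?_⟩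
            simp only [pvD, String.reduceEq, reduceIte, add_zero]
            rw [pvFillAbs, if_neg (by omega : ¬ n ≤ 0), if_neg h1, if_neg h2, if_pos rfl]
            by_cases hn1 : n - 1 ≤ 0
            · rw [show min ((5 : Int) - e) n = 1 from by omega,
                pvFillAbs_nonpos rest q w (e + 1) (n - 1) hn1,
                pvFillAbs_nonpos ("E" :: rest) q w (e + 1) (n - 1) hn1]
              simp
            · conv_rhs => rw [pvFillAbs]
              rw [if_neg hn1, if_neg h1, if_neg h2, if_pos rfl,
                show min ((5 : Int) - (e + 1)) (n - 1) = min (5 - e) n - 1 from by omega,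
                show e + 1 + (min ((5 : Int) - e) n - 1) = e + min (5 - e) n from by ring,
                show n - 1 - (min ((5 : Int) - e) n - 1) = n - min (5 - e) n from by ring,
                show (min ((5 : Int) - e) n).toNat = (min ((5 : Int) - e) n - 1).toNat + 1 from by omega,
                List.replicate_succ]
              simp
          · have he : e = 5 := by omega
            subst he
            have hcap' : n ≤ pvCap rest q w 5 := by
              simp only [pvCap, reduceIte, if_neg h1, if_neg h2] at hcap; omega
            obtain ⟨s, hps, hfs⟩ := ih q w 5 n hq0 hq5 hw0 hw5 (by norm_num) le_rfl hn hcap'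
            have hsne : s ≠ "E" := by
              rcases (pvPick_spec hps).2 with ⟨h, _⟩ | ⟨h, _⟩ | ⟨h, hlt⟩
              · simp [h]
              · simp [h]
              · omega
            refine ⟨s, by simp [pvPick, h5, hps], ?_⟩
            have hzero : pvD s "E" = 0 := by simp [pvD, hsne]
            rw [pvFillAbs, if_neg (by omega : ¬ n ≤ 0), if_neg h1, if_neg h2, if_pos rfl,
              show min ((5 : Int) - 5) n = 0 from by omega]
            simp only [Int.toNat_zero, List.replicate_zero, List.nil_append, add_zero, sub_zero]
            rw [hfs, hzero, add_zero]
            congr 1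
            by_cases hn1 : n - 1 ≤ 0
            · rw [pvFillAbs_nonpos rest _ _ _ _ hn1, pvFillAbs_nonpos ("E" :: rest) _ _ _ _ hn1]
            · conv_rhs => rw [pvFillAbs]
              rw [if_neg hn1, if_neg h1, if_neg h2, if_pos rfl,
                show min ((5 : Int) - 5) (n - 1) = 0 from by omega]
              simp
        · have hcap' : n ≤ pvCap rest q w e := by
            simp only [pvCap, if_neg h1, if_neg h2, if_neg h3] at hcap; omega
          obtain ⟨s, hps, hfs⟩ := ih q w e n hq0 hq5 hw0 hw5 he0 he5 hn hcap'
          refine ⟨s, by simp [pvPick, h1, h2, h3, hps], ?_⟩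
          rw [pvFillAbs, if_neg (by omega : ¬ n ≤ 0), if_neg h1, if_neg h2, if_neg h3, hfs]
          congr 1
          by_cases hn1 : n - 1 ≤ 0
          · rw [pvFillAbs_nonpos rest _ _ _ _ hn1, pvFillAbs_nonpos (a :: rest) _ _ _ _ hn1]
          · conv_rhs => rw [pvFillAbs]
            rw [if_neg hn1, if_neg h1, if_neg h2, if_neg h3]

lemma pvCap_bump_Q (order : List String) :
    ∀ (q w e : Int), q ≤ 5 → w ≤ 5 → e ≤ 5 → pvPick order q w e = some "Q" →
      pvCap order (q + 1) w e = pvCap order q w e - 1 := by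
  induction order with
  | nil => intro q w e _ _ _ h; simp [pvPick] at h
  | cons a rest ih =>
    intro q w e hq hw he h
    by_cases h1 : a = "Q"
    · subst h1
      by_cases h5 : q < 5
      · simp only [pvCap, String.reduceEq, reduceIte]; omega
      · simp only [pvPick, reduceIte, if_neg h5] at h
        exact absurd (pvPick_spec h).2 (by simp; omega)
    · by_cases h2 : a = "W"
      · subst h2
        by_cases h5 : w < 5
        · simp [pvPick, h5] at h
        · have hw5 : w = 5 := by omega
          subst hw5
          simp only [pvPick, String.reduceEq, reduceIte, if_neg h5] at h
          simp only [pvCap, String.reduceEq, reduceIte]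
          have := ih q 5 e hq le_rfl he h
          omega
      · by_cases h3 : a = "E"
        · subst h3
          by_cases h5 : e < 5
          · simp [pvPick, h5] at h
          · have he5 : e = 5 := by omega
            subst he5
            simp only [pvPick, String.reduceEq, reduceIte, if_neg h5] at h
            simp only [pvCap, String.reduceEq, reduceIte]
            have := ih q w 5 hq hw le_rfl h
            omega
        · simp only [pvPick, if_neg h1, if_neg h2, if_neg h3] at h
          simp only [pvCap, if_neg h1, if_neg h2, if_neg h3]
          exact ih q w e hq hw he h

lemma pvCap_bump_W (order : List String) :
    ∀ (q w e : Int), q ≤ 5 → w ≤ 5 → e ≤ 5 → pvPick order q w e = some "W" →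
      pvCap order q (w + 1) e = pvCap order q w e - 1 := by
  induction order with
  | nil => intro q w e _ _ _ h; simp [pvPick] at h
  | cons a rest ih =>
    intro q w e hq hw he h
    by_cases h1 : a = "Q"
    · subst h1
      by_cases h5 : q < 5
      · simp [pvPick, h5] at h
      · have hq5 : q = 5 := by omega
        subst hq5
        simp only [pvPick, String.reduceEq, reduceIte, if_neg h5] at h
        simp only [pvCap, String.reduceEq, reduceIte]
        have := ih 5 w e le_rfl hw he h
        omega
    · by_cases h2 : a = "W"
      · subst h2
        by_cases h5 : w < 5
        · simp only [pvCap, String.reduceEq, reduceIte, if_neg h1]; omega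
        · simp only [pvPick, String.reduceEq, reduceIte, if_neg h5, if_neg h1] at h
          exact absurd (pvPick_spec h).2 (by simp; omega)
      · by_cases h3 : a = "E"
        · subst h3
          by_cases h5 : e < 5
          · simp [pvPick, h5, h1] at h
          · have he5 : e = 5 := by omega
            subst he5
            simp only [pvPick, String.reduceEq, reduceIte, if_neg h5, if_neg h1] at h
            simp only [pvCap, String.reduceEq, reduceIte, if_neg h1]
            have := ih q w 5 hq hw le_rfl h
            omega
        · simp only [pvPick, if_neg h1, if_neg h2, if_neg h3] at h
          simp only [pvCap, if_neg h1, if_neg h2, if_neg h3]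
          exact ih q w e hq hw he h

lemma pvCap_bump_E (order : List String) :
    ∀ (q w e : Int), q ≤ 5 → w ≤ 5 → e ≤ 5 → pvPick order q w e = some "E" →
      pvCap order q w (e + 1) = pvCap order q w e - 1 := by
  induction order with
  | nil => intro q w e _ _ _ h; simp [pvPick] at h
  | cons a rest ih =>
    intro q w e hq hw he h
    by_cases h1 : a = "Q"
    · subst h1
      by_cases h5 : q < 5
      · simp [pvPick, h5] at h
      · have hq5 : q = 5 := by omega
        subst hq5
        simp only [pvPick, String.reduceEq, reduceIte, if_neg h5] at h
        simp only [pvCap, String.reduceEq, reduceIte]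
        have := ih 5 w e le_rfl hw he h
        omega
    · by_cases h2 : a = "W"
      · subst h2
        by_cases h5 : w < 5
        · simp [pvPick, h5, h1] at h
        · have hw5 : w = 5 := by omega
          subst hw5
          simp only [pvPick, String.reduceEq, reduceIte, if_neg h5, if_neg h1] at h
          simp only [pvCap, String.reduceEq, reduceIte, if_neg h1]
          have := ih q 5 e hq le_rfl he h
          omega
      · by_cases h3 : a = "E"
        · subst h3
          by_cases h5 : e < 5
          · simp only [pvCap, String.reduceEq, reduceIte, if_neg h1, if_neg h2]; omega
          · simp only [pvPick, String.reduceEq, reduceIte, if_neg h5, if_neg h1, if_neg h2] at h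
            exact absurd (pvPick_spec h).2 (by simp; omega)
        · simp only [pvPick, if_neg h1, if_neg h2, if_neg h3] at h
          simp only [pvCap, if_neg h1, if_neg h2, if_neg h3]
          exact ih q w e hq hw he h

lemma pvCap_ge (order : List String) :
    ∀ (q w e : Int),
      (if "Q" ∈ order then 5 - q else 0) + (if "W" ∈ order then 5 - w else 0) +
        (if "E" ∈ order then 5 - e else 0) ≤ pvCap order q w e := by
  induction order with
  | nil => intro q w e; simp [pvCap]
  | cons a rest ih =>
    intro q w e
    by_cases h1 : a = "Q"
    · subst h1
      have H := ih 5 w e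
      by_cases hq : "Q" ∈ rest <;> by_cases hw : "W" ∈ rest <;> by_cases he : "E" ∈ rest <;>
        simp only [pvCap, String.reduceEq, reduceIte, List.mem_cons, hq, hw, he,
          iff_true, iff_false, true_or, false_or, or_false, if_true, if_false] at H ⊢ <;> omega
    · by_cases h2 : a = "W"
      · subst h2
        have H := ih q 5 e
        by_cases hq : "Q" ∈ rest <;> by_cases hw : "W" ∈ rest <;> by_cases he : "E" ∈ rest <;>
          simp only [pvCap, String.reduceEq, reduceIte, List.mem_cons, hq, hw, he,
            iff_true, iff_false, true_or, false_or, or_false, if_true, if_false] at H ⊢ <;> omega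
      · by_cases h3 : a = "E"
        · subst h3
          have H := ih q w 5
          by_cases hq : "Q" ∈ rest <;> by_cases hw : "W" ∈ rest <;> by_cases he : "E" ∈ rest <;>
            simp only [pvCap, String.reduceEq, reduceIte, List.mem_cons, hq, hw, he,
              iff_true, iff_false, true_or, false_or, or_false, if_true, if_false] at H ⊢ <;> omega
        · have H := ih q w e
          have e1 : ¬ ("Q" = a) := fun h => h1 h.symm
          have e2 : ¬ ("W" = a) := fun h => h2 h.symm
          have e3 : ¬ ("E" = a) := fun h => h3 h.symm
          by_cases hq : "Q" ∈ rest <;> by_cases hw : "W" ∈ rest <;> by_cases he : "E" ∈ rest <;>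
            simp only [pvCap, if_neg h1, if_neg h2, if_neg h3, List.mem_cons, hq, hw, he, e1, e2, e3,
              iff_true, iff_false, true_or, or_true, false_or, or_false, if_true, if_false] at H ⊢ <;> omega

lemma pvNonR_nonneg (ls : List Int) : 0 ≤ pvNonR ls := by
  induction ls with
  | nil => simp [pvNonR]
  | cons l ls ih => simp only [pvNonR]; split <;> omega

lemma pvSim_eq_weave (order : List String) :
    ∀ (ls : List Int) (q w e : Int), 0 ≤ q → q ≤ 5 → 0 ≤ w → w ≤ 5 → 0 ≤ e → e ≤ 5 →
      pvNonR ls ≤ pvCap order q w e →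
      pvASim order ls q w e = pvWeave ls (pvFillAbs order q w e (pvNonR ls)) := by
  intro ls
  induction ls with
  | nil => intro q w e _ _ _ _ _ _ _; rfl
  | cons l ls ih =>
    intro q w e hq0 hq5 hw0 hw5 he0 he5 hcap
    by_cases hl : PySem.Set.contains pvRLevels l
    · rw [pvASim, pvWeave, if_pos hl, if_pos hl,
        show pvNonR (l :: ls) = pvNonR ls from by simp only [pvNonR, if_pos hl, zero_add]]
      rw [show pvNonR (l :: ls) = pvNonR ls from by simp only [pvNonR, if_pos hl, zero_add]] at hcap
      rw [ih q w e hq0 hq5 hw0 hw5 he0 he5 hcap]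
    · have hn : pvNonR (l :: ls) = 1 + pvNonR ls := by simp only [pvNonR, if_neg hl]
      have hn0 : 0 < pvNonR (l :: ls) := by have := pvNonR_nonneg ls; omega
      obtain ⟨s, hps, hfs⟩ :=
        pvFill_cons order q w e (pvNonR (l :: ls)) hq0 hq5 hw0 hw5 he0 he5 hn0 hcap
      rw [pvASim, pvWeave, if_neg hl, if_neg hl, hps, hfs]
      simp only [List.headD_cons, List.tail_cons]
      have hstep : pvNonR (l :: ls) - 1 = pvNonR ls := by omega
      rw [hstep]
      rcases (pvPick_spec hps).2 with ⟨h, hlt⟩ | ⟨h, hlt⟩ | ⟨h, hlt⟩ <;> subst h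
      · have hc := pvCap_bump_Q order q w e hq5 hw5 he5 hps
        simp only [pvD, String.reduceEq, reduceIte, add_zero] at hfs ⊢
        rw [ih (q + 1) w e (by omega) (by omega) hw0 hw5 he0 he5 (by omega)]
      · have hc := pvCap_bump_W order q w e hq5 hw5 he5 hps
        simp only [pvD, String.reduceEq, reduceIte, add_zero] at hfs ⊢
        rw [ih q (w + 1) e hq0 hq5 (by omega) (by omega) he0 he5 (by omega)]
      · have hc := pvCap_bump_E order q w e hq5 hw5 he5 hps
        simp only [pvD, String.reduceEq, reduceIte, add_zero] at hfs ⊢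
        rw [ih q w (e + 1) hq0 hq5 hw0 hw5 (by omega) (by omega) (by omega)]

-- ---- A's normalized skill_order equals B's order list ----

-- filtering out "R" commutes with one append-if-missing step for a non-R element
lemma pvStep_filter (l : List String) (s : String) (hs : s ≠ "R") :
    (if l.contains s then l else l ++ [s]).filter (fun t => t != "R")
      = (if (l.filter (fun t => t != "R")).contains s then l.filter (fun t => t != "R")
         else l.filter (fun t => t != "R") ++ [s]) := by
  have hmem : (l.filter (fun t => t != "R")).contains s = l.contains s := by
    simp [List.elem_eq_contains.symm, List.elem_eq_mem, List.mem_filter, hs]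
  rw [hmem]
  by_cases h : l.contains s
  · rw [if_pos h, if_pos h]
  · rw [if_neg h, if_neg h, List.filter_append]
    simp [hs]

-- filtering out "R" kills A's R-repositioning step
lemma pvRemove_filter (l : List String) :
    (((PySem.List.remove? l "R").getD l).filter (fun t => t != "R"))
      = l.filter (fun t => t != "R") := by
  induction l with
  | nil => rfl
  | cons a rest ih =>
    by_cases h : a = "R"
    · subst h
      rw [PySem.List.remove?_cons_self]
      simp
    · rw [PySem.List.remove?_cons_of_ne rest h]
      cases hr : PySem.List.remove? rest "R" with
      | none => simp
      | some l' =>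
        have ih' : l'.filter (fun t => t != "R") = rest.filter (fun t => t != "R") := by
          rw [hr] at ih
          simpa using ih
        simp [List.filter_cons, h, ih']

lemma pvInsert0_filter (l : List String) :
    ((PySem.List.insert l 0 "R").filter (fun t => t != "R")) = l.filter (fun t => t != "R") := by
  rw [PySem.List.insert_zero]
  simp

lemma pvParseA_eq_orderB (p : String) : pvParseA p = pvOrderB p := by
  unfold pvParseA pvOrderB pvTokens
  set toks := ((PySem.Str.split? (if p = "" ∨ PySem.Str.isIn ">" p = false then "R>Q>W>E" else p) ">").getD []).map
    (fun q => PySem.Str.upper (PySem.Str.strip q)) with htoks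
  set t4 := if toks.length < 4 then ["R", "Q", "W", "E"] else toks with ht4
  -- the R-repositioning step does not change the non-R filtrate
  have hadj : ∀ l : List String,
      ((if l.contains "R" = false then PySem.List.insert l 0 "R"
        else if PySem.List.pyGetD l 0 "" ≠ "R" then
          PySem.List.insert ((PySem.List.remove? l "R").getD l) 0 "R"
        else l).filter (fun t => t != "R")) = l.filter (fun t => t != "R") := by
    intro l
    by_cases hc : l.contains "R" = false
    · rw [if_pos hc, pvInsert0_filter]
    · rw [if_neg hc]
      by_cases hh : PySem.List.pyGetD l 0 "" ≠ "R"
      · rw [if_pos hh, pvInsert0_filter, pvRemove_filter]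
      · rw [if_neg hh]
  -- push the filter through the three append-if-missing steps
  set adj := (if t4.contains "R" = false then PySem.List.insert t4 0 "R"
      else if PySem.List.pyGetD t4 0 "" ≠ "R" then
        PySem.List.insert ((PySem.List.remove? t4 "R").getD t4) 0 "R"
      else t4) with hadjdef
  have hfilt : adj.filter (fun t => t != "R") = t4.filter (fun t => t != "R") := hadj t4
  set f := t4.filter (fun t => t != "R") with hf
  show ((["Q", "W", "E"]).foldl (fun ps s => if ps.contains s then ps else ps ++ [s]) adj).filter
      (fun t => t != "R") = f ++ (["Q", "W", "E"]).filter (fun s => !f.contains s)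
  have s1 := pvStep_filter adj "Q" (by decide)
  rw [hfilt] at s1
  have s2 := pvStep_filter (if adj.contains "Q" then adj else adj ++ ["Q"]) "W" (by decide)
  rw [s1] at s2
  have s3 := pvStep_filter
    (if (if adj.contains "Q" then adj else adj ++ ["Q"]).contains "W"
     then (if adj.contains "Q" then adj else adj ++ ["Q"])
     else (if adj.contains "Q" then adj else adj ++ ["Q"]) ++ ["W"]) "E" (by decide)
  rw [s2] at s3
  simp only [List.foldl_cons, List.foldl_nil]
  rw [s3]
  -- both sides now only depend on f's three membership bits
  by_cases hQ : "Q" ∈ f <;> by_cases hW : "W" ∈ f <;> by_cases hE : "E" ∈ f <;>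
    simp [hQ, hW, hE, List.filter]

lemma pvOrderB_mem (p : String) :
    "Q" ∈ pvOrderB p ∧ "W" ∈ pvOrderB p ∧ "E" ∈ pvOrderB p := by
  unfold pvOrderB
  set f := (pvTokens p).filter (fun t => t != "R") with hf
  refine ⟨?_, ?_, ?_⟩ <;>
  · simp only [List.mem_append]
    by_cases h : "Q" ∈ f <;> by_cases h2 : "W" ∈ f <;> by_cases h3 : "E" ∈ f <;>
      simp [h, h2, h3, List.filter]

lemma pvOrderB_noR (p : String) : "R" ∉ pvOrderB p := by
  unfold pvOrderB
  intro h
  rw [List.mem_append] at h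
  rcases h with h | h <;> simp [List.mem_filter] at h

-- ===== VERDICT (by name: the statement is the Claim_ definition above) =====
theorem generate_skill_sequence_spec : Claim_equal_generate_skill_sequence := by
  intro p _ _
  unfold Spec_generate_skill_sequence generate_skill_sequence generate_skill_sequence_alt
  show pvALevels (pvParseA p) (PySem.List.pyRange 1 19 1) (pvCanon 0 0 0 0) []
      = pvBOut (PySem.List.pyRange 1 19 1) (pvBFill (pvOrderB p) pvCaps0 [])
  obtain ⟨hQ, hW, hE⟩ := pvOrderB_mem p
  have hR := pvOrderB_noR p
  rw [pvParseA_eq_orderB p,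
      pvALevels_eq hR _ (pvRel_canon 0 0 0 0),
      pvBFill_spec pvRelC_caps0 le_rfl (by norm_num) le_rfl (by norm_num) le_rfl (by norm_num) [],
      pvBOut_eq_weave, List.nil_append, List.nil_append]
  have hn : pvNonR (PySem.List.pyRange 1 19 1) = 15 := by decide
  have hcap : (15 : Int) ≤ pvCap (pvOrderB p) 0 0 0 := by
    have := pvCap_ge (pvOrderB p) 0 0 0
    rw [if_pos hQ, if_pos hW, if_pos hE] at this
    omega
  rw [show (15 : Int) - (([] : List String).length : Int) = 15 from by norm_num, ← hn]
  exact pvSim_eq_weave (pvOrderB p) (PySem.List.pyRange 1 19 1) 0 0 0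
    le_rfl (by norm_num) le_rfl (by norm_num) le_rfl (by norm_num) (hn ▸ hcap)
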